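-- pv_equiv track=rewrite | github.com/Gaspi/my-project-euler | euler106.py | wp
-- ===== SOURCE A (Python) =====
-- def wp(s):
--     c = 0
--     for i in s:
--         if i == '1':
--             c+=1
--         elif i == '2':
--             c-=1
--         if c < 0:
--             return False
--     return True
-- ===== SOURCE B (Python) =====
-- def wp(s):
--     # Divide and conquer: each segment is summarized by (total delta, minimum
--     # prefix balance); segments combine associatively, and the whole string is
--     # valid iff its minimum prefix balance is non-negative.
--     def scan(lo, hi):
--         if lo == hi:
--             return (0, 0)
--         if hi - lo == 1:
--             ch = s[lo]
--             d = 1 if ch == '1' else -1 if ch == '2' else 0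
--             return (d, min(0, d))
--         mid = (lo + hi) // 2
--         s1, m1 = scan(lo, mid)
--         s2, m2 = scan(mid, hi)
--         return (s1 + s2, min(m1, s1 + m2))
--     return scan(0, len(s))[1] >= 0
-- ===== Notes on version B (the rewrite author's own statement) =====
-- stated objective: alternative
-- what changed: Replaces the sequential update-and-early-return scan by a divide-and-conquer that summarizes each half of the string as a (total delta, minimum prefix balance) pair, merges the summaries associatively, and tests the root's minimum prefix balance for non-negativity.
import Mathlib
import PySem

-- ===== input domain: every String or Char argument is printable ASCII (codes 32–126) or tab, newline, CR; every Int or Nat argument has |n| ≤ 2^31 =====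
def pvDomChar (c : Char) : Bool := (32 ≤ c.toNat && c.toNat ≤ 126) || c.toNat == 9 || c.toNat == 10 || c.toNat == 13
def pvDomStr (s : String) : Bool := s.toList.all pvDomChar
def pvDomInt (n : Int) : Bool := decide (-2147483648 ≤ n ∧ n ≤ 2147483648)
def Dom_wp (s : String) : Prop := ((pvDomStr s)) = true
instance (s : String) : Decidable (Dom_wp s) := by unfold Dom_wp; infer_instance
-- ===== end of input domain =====

-- B replaces A's sequential update-and-early-return scan by a divide-and-conquer that
-- summarizes each half as a (total delta, minimum prefix balance) pair and merges them;
-- same cost, different algorithm.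

-- ===== PORT A =====
-- A's loop with early return, as structural recursion over the characters carrying c.
def wpAux : List Char → Int → Bool
  | [], _ => true
  | i :: t, c =>
      let c' := if i = '1' then c + 1 else if i = '2' then c - 1 else c
      if c' < 0 then false else wpAux t c'

def wp (s : String) : Bool := wpAux s.toList 0

-- ===== PORT B =====
-- Source B's delta of one character
def pvDelta (c : Char) : Int := if c = '1' then 1 else if c = '2' then -1 else 0

-- Source B's scan(lo, hi), over the corresponding sublist; mid = (lo+hi)//2 splits it at half length
def wpScan : List Char → Int × Int
  | [] => (0, 0)
  | [c] => (pvDelta c, min 0 (pvDelta c))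
  | c1 :: c2 :: t =>
      let k := (c1 :: c2 :: t).length / 2
      let p1 := wpScan ((c1 :: c2 :: t).take k)
      let p2 := wpScan ((c1 :: c2 :: t).drop k)
      (p1.1 + p2.1, min p1.2 (p1.1 + p2.2))
termination_by l => l.length
decreasing_by
  · simp [List.length_take]; omega
  · simp [List.length_drop]; omega

def wp_alt (s : String) : Bool := decide (0 ≤ (wpScan s.toList).2)

-- ===== PRECONDITION & SPEC =====
def Spec_wp (s : String) (out : Bool) : Prop := out = wp_alt s
instance (s : String) (out : Bool) : Decidable (Spec_wp s out) := by unfold Spec_wp; infer_instance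

-- ===== CLAIM (what is proved, stated in full; the proofs are below) =====
def Claim_equal_wp : Prop := ∀ (s : String), Dom_wp s → Spec_wp s (wp s)

-- ===== LEMMAS AND PROOFS =====

-- total delta and minimum prefix balance of a character list, specified sequentially
def pvSum : List Char → Int
  | [] => 0
  | c :: t => pvDelta c + pvSum t

def pvMin : List Char → Int
  | [] => 0
  | c :: t => min 0 (pvDelta c + pvMin t)

theorem pvMin_nonpos (l : List Char) : pvMin l ≤ 0 := by
  cases l <;> simp [pvMin]

theorem pvSum_append (a b : List Char) : pvSum (a ++ b) = pvSum a + pvSum b := by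
  induction a with
  | nil => simp [pvSum]
  | cons c t ih => simp [pvSum, ih]; ring

theorem pvMin_append (a b : List Char) :
    pvMin (a ++ b) = min (pvMin a) (pvSum a + pvMin b) := by
  induction a with
  | nil => simp [pvMin, pvSum, min_eq_right (pvMin_nonpos b)]
  | cons c t ih => simp [pvMin, pvSum, ih]; omega

theorem wpScan_eq (l : List Char) : wpScan l = (pvSum l, pvMin l) := by
  induction l using wpScan.induct with
  | case1 => simp [wpScan, pvSum, pvMin]
  | case2 c => simp [wpScan, pvSum, pvMin]
  | case3 c1 c2 t k ih1 ih2 =>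
      rw [wpScan]
      have hk : k = (c1 :: c2 :: t).length / 2 := rfl
      rw [hk] at ih1 ih2
      simp only [ih1, ih2]
      conv_rhs => rw [← List.take_append_drop ((c1 :: c2 :: t).length / 2) (c1 :: c2 :: t)]
      rw [pvSum_append, pvMin_append]

theorem wpAux_eq (l : List Char) (c : Int) (hc : 0 ≤ c) :
    wpAux l c = decide (0 ≤ c + pvMin l) := by
  induction l generalizing c with
  | nil => simp [wpAux, pvMin, hc]
  | cons i t ih =>
      have hm := pvMin_nonpos t
      simp only [wpAux, pvMin]
      by_cases h : (if i = '1' then c + 1 else if i = '2' then c - 1 else c) < 0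
      · rw [if_pos h]
        have : ¬ (0 ≤ c + min 0 (pvDelta i + pvMin t)) := by
          simp only [pvDelta]
          split_ifs at h ⊢ <;> omega
        simp [this]
      · rw [if_neg h, ih _ (by omega)]
        have : (0 ≤ (if i = '1' then c + 1 else if i = '2' then c - 1 else c) + pvMin t)
            ↔ (0 ≤ c + min 0 (pvDelta i + pvMin t)) := by
          simp only [pvDelta]
          split_ifs <;> omega
        simp [this]

-- ===== VERDICT (by name: the statement is the Claim_ definition above) =====
theorem wp_spec : Claim_equal_wp := by
  intro s _
  show wp s = wp_alt s
  rw [wp, wp_alt, wpScan_eq, wpAux_eq _ _ le_rfl]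
  simp
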